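-- pv_equiv track=rewrite | github.com/Rustam-Z/cracking-maang | _google/graph_traverse_till_see_same_node.py | solution
-- ===== SOURCE A (Python) =====
-- def solution(graph: dict) -> list:
--     result = []
--
--     def backtrack(start, end, path, visited):
--         if end in graph[path[-1]]:  # If end is in the neighbors of the last node in path.
--             if len(path + end) > len(set(path + end)):
--                 result.append(path + end)
--
--         for neighbor in graph[start]:
--             if neighbor not in visited:
--                 visited.add(neighbor)
--                 backtrack(neighbor, end, path + neighbor, visited)
--                 visited.remove(neighbor)
--
--     for key in graph:
--         backtrack("A", key, "A", {"A"})
--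
--     return result
-- ===== SOURCE B (Python) =====
-- def solution(graph: dict) -> list:
--     if not graph:
--         return []
--     # one DFS enumerates every simple-path string from "A" once (preorder);
--     # each key then filters that list, instead of re-running a DFS per key
--     paths = []
--
--     def dfs(node, path, visited):
--         paths.append(path)
--         for nb in graph[node]:
--             if nb not in visited:
--                 visited.add(nb)
--                 dfs(nb, path + nb, visited)
--                 visited.remove(nb)
--
--     dfs("A", "A", {"A"})
--     return [path + end
--             for end in graph
--             for path in paths
--             if end in graph[path[-1]] and len(path + end) > len(set(path + end))]
-- ===== Notes on version B (the rewrite author's own statement) =====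
-- stated objective: alternative
-- what changed: A re-runs a fresh recursive backtracking traversal once per dict key, appending hits inline; B runs ONE DFS that enumerates every simple-path string from 'A' into a list, then produces the result with a single comprehension filtering that precomputed list per key (K traversals collapsed into one traversal plus a filtering pass).
import Mathlib
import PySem

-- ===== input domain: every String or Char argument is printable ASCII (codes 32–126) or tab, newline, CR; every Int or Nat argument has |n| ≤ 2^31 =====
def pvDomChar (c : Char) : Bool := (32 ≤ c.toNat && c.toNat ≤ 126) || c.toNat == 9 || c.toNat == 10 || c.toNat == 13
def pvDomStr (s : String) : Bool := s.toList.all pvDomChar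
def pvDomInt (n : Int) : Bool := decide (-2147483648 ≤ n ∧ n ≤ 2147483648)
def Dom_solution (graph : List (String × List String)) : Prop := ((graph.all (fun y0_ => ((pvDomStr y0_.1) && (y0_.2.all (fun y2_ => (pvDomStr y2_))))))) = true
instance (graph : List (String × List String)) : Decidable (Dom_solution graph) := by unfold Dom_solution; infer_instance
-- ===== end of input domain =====

-- B replaces A's per-key backtracking traversal (one fresh DFS per dict key, hits appended
-- inline) by ONE DFS collecting every simple-path string, then one filtering comprehension
-- per key (objective: alternative decomposition — K traversals collapsed into one).

-- shared helper: dict lookup on the association list (first match; the default [] is only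
-- reached outside Pre_, where the Python raises KeyError)
def pvAdj (graph : List (String × List String)) (k : String) : List String :=
  match graph with
  | [] => []
  | p :: rest => if p.1 = k then p.2 else pvAdj rest k

-- shared helper, Python path[-1] as a 1-character string (the "" default is the
-- IndexError case, unreachable: path always starts with "A")
def pvLast1 (path : String) : String :=
  match PySem.Str.pyGet? path (-1) with
  | some c => String.ofList [c]
  | none => ""

-- totality fuel for both DFS recursions: the recursion depth is bounded by the number of
-- distinct neighbour strings, hence by this sum (each descent marks one new neighbour),
-- so the fuel never runs out on any input
def pvFuel (graph : List (String × List String)) : Nat :=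
  1 + (graph.map (fun p => p.2.length)).sum

-- ===== PORT A =====
-- backtrack(start, end, path, visited); `visited.add(nb); backtrack(…); visited.remove(nb)`
-- is passing `visited.add nb` to the recursive call (nb ∉ visited, so the remove restores
-- visited exactly); the nested `if`s of the hit test are kept as in A
def backtrackA (graph : List (String × List String)) :
    Nat → String → String → String → PySem.Set String → List String
  | 0, _, _, _, _ => []
  | fuel+1, start, end_, path, visited =>
    let hit : List String :=
      if end_ ∈ pvAdj graph (pvLast1 path) then
        if (path ++ end_).toList.length > (PySem.Set.ofList (path ++ end_).toList).length then
          [path ++ end_]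
        else []
      else []
    (pvAdj graph start).foldl
      (fun acc nb =>
        if PySem.Set.contains visited nb then acc
        else acc ++ backtrackA graph fuel nb end_ (path ++ nb) (PySem.Set.add visited nb))
      hit

def solution (graph : List (String × List String)) : List String :=
  (graph.map Prod.fst).foldl
    (fun res key => res ++ backtrackA graph (pvFuel graph) "A" key "A" (PySem.Set.ofList ["A"]))
    []

-- ===== PORT B =====
-- dfs(node, path, visited): collect the path string of every frame, in preorder
def dfsP (graph : List (String × List String)) :
    Nat → String → String → PySem.Set String → List String
  | 0, _, _, _ => []
  | fuel+1, node, path, visited =>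
    path ::
      (pvAdj graph node).foldl
        (fun acc nb =>
          if PySem.Set.contains visited nb then acc
          else acc ++ dfsP graph fuel nb (path ++ nb) (PySem.Set.add visited nb))
        []

-- `if not graph: return []`, then the comprehension over the precomputed path list
def solution_alt (graph : List (String × List String)) : List String :=
  match graph with
  | [] => []
  | _ =>
    let paths := dfsP graph (pvFuel graph) "A" "A" (PySem.Set.ofList ["A"])
    (graph.map Prod.fst).flatMap (fun end_ =>
      paths.filterMap (fun path =>
        if end_ ∈ pvAdj graph (pvLast1 path) ∧
            (path ++ end_).toList.length > (PySem.Set.ofList (path ++ end_).toList).length then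
          some (path ++ end_)
        else none))

-- ===== PRECONDITION & SPEC =====
-- helpers for Pre_: the nodes reachable from "A" (closure of the neighbour relation;
-- `graph.length + 1` expansion rounds reach the fixpoint, since each round that adds
-- anything new unlocks at least one of the ≤ graph.length keys)
def pvReachStep (graph : List (String × List String)) (R : List String) : List String :=
  PySem.Set.ofList (R ++ (graph.filter (fun p => p.1 ∈ R)).flatMap (fun p => p.2))

def pvReachN (graph : List (String × List String)) : Nat → List String
  | 0 => ["A"]
  | n+1 => pvReachStep graph (pvReachN graph n)

def pvReach (graph : List (String × List String)) : List String :=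
  pvReachN graph (graph.length + 1)

-- Pre_ is exactly where the Python A returns normally: either the dict is empty (the key
-- loop never runs), or "A" is a key and every node reachable from "A" is a key whose last
-- character is again a key (otherwise the lookups graph[start] / graph[path[-1]] raise
-- KeyError on the first key's traversal).  Keys must be distinct: the assoc list stands
-- for a Python dict.
def Pre_solution (graph : List (String × List String)) : Prop :=
  graph = [] ∨
  ((graph.map Prod.fst).Nodup ∧ "A" ∈ graph.map Prod.fst ∧
    ∀ n ∈ pvReach graph,
      n ∈ graph.map Prod.fst ∧ (n ≠ "" → pvLast1 n ∈ graph.map Prod.fst))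
instance (graph : List (String × List String)) : Decidable (Pre_solution graph) := by
  unfold Pre_solution; infer_instance

def pvWitness_solution : (List (String × List String)) := [("A", ["B"]), ("B", ["A"])]

def Spec_solution (graph : List (String × List String)) (out : List String) : Prop :=
  out = solution_alt graph
instance (graph : List (String × List String)) (out : List String) : Decidable (Spec_solution graph out) := by
  unfold Spec_solution; infer_instance

-- ===== CLAIM (what is proved, stated in full; the proofs are below) =====
def Claim_equal_solution : Prop :=
  ∀ (graph : List (String × List String)), Dom_solution graph → Pre_solution graph →
    Spec_solution graph (solution graph)

-- ===== LEMMAS AND PROOFS =====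

lemma pv_foldl_if_append {α β : Type} (q : α → Bool) (f : α → List β) :
    ∀ (l : List α) (init : List β),
      List.foldl (fun acc x => if q x then acc else acc ++ f x) init l
        = init ++ l.flatMap (fun x => if q x then [] else f x) := by
  intro l
  induction l with
  | nil => simp
  | cons a t ih => intro init; by_cases h : q a <;> simp [h, ih]

lemma pv_flatMap_congr {α β : Type} {l : List α} {f g : α → List β}
    (h : ∀ x ∈ l, f x = g x) : l.flatMap f = l.flatMap g := by
  induction l with
  | nil => rfl
  | cons a t ih => simp_all

lemma pv_foldl_append {α β : Type} (f : α → List β) :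
    ∀ (l : List α) (init : List β),
      List.foldl (fun acc x => acc ++ f x) init l = init ++ l.flatMap f := by
  intro l
  induction l with
  | nil => simp
  | cons a t ih => intro init; simp [ih]

-- the heart: A's backtracking for one key equals B's collected path list filtered for
-- that key — frame for frame and fuel for fuel, on EVERY graph (the hit test and the
-- descent test of the two ports coincide syntactically once the paths agree)
lemma pv_backtrack_eq (graph : List (String × List String)) (end_ : String) :
    ∀ (fuel : Nat) (start path : String) (visited : PySem.Set String),
      backtrackA graph fuel start end_ path visited
        = (dfsP graph fuel start path visited).filterMap (fun p =>
            if end_ ∈ pvAdj graph (pvLast1 p) ∧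
                (p ++ end_).toList.length > (PySem.Set.ofList (p ++ end_).toList).length then
              some (p ++ end_)
            else none) := by
  intro fuel
  induction fuel with
  | zero => intros; rfl
  | succ fuel ih =>
    intro start path visited
    rw [backtrackA, dfsP]
    rw [pv_foldl_if_append, pv_foldl_if_append, List.filterMap_cons, List.nil_append,
        List.filterMap_flatMap]
    have hrest := pv_flatMap_congr (l := pvAdj graph start)
      (f := fun nb =>
        if PySem.Set.contains visited nb then []
        else backtrackA graph fuel nb end_ (path ++ nb) (PySem.Set.add visited nb))
      (g := fun nb =>
        (if PySem.Set.contains visited nb then []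
         else dfsP graph fuel nb (path ++ nb) (PySem.Set.add visited nb)).filterMap (fun p =>
            if end_ ∈ pvAdj graph (pvLast1 p) ∧
                (p ++ end_).toList.length > (PySem.Set.ofList (p ++ end_).toList).length then
              some (p ++ end_)
            else none))
      (by intro nb _
          dsimp only
          by_cases h : PySem.Set.contains visited nb = true
          · rw [if_pos h, if_pos h]; rfl
          · rw [if_neg h, if_neg h]
            exact ih nb (path ++ nb) (PySem.Set.add visited nb))
    rw [hrest]
    -- the hit list is the filterMap head
    by_cases h1 : end_ ∈ pvAdj graph (pvLast1 path)
    · by_cases h2 :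
        (path ++ end_).toList.length > (PySem.Set.ofList (path ++ end_).toList).length
      · rw [if_pos h1, if_pos h2, if_pos (And.intro h1 h2)]; rfl
      · rw [if_pos h1, if_neg h2, if_neg (fun hc => h2 hc.2)]; rfl
    · rw [if_neg h1, if_neg (fun hc => h1 hc.1)]; rfl

-- ===== VERDICT (by name: the statement is the Claim_ definition above) =====
theorem solution_spec : Claim_equal_solution := by
  intro graph _ _
  unfold Spec_solution solution solution_alt
  match graph with
  | [] => rfl
  | p :: rest =>
    rw [pv_foldl_append, List.nil_append]
    exact pv_flatMap_congr (fun key _ => pv_backtrack_eq (p :: rest) key (pvFuel (p :: rest)) "A" "A" (PySem.Set.ofList ["A"]))
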